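-- pv_equiv track=rewrite | github.com/Rezme-Inc/incentive_agent | agents/gap_analyzer.py | _check_federal_coverage
-- ===== SOURCE A (Python) =====
-- from typing import Dict, List, Any, Optional, Set
--
-- UNIVERSAL_FEDERAL_PROGRAMS = [
--     {"name": "Work Opportunity Tax Credit (WOTC)", "type": "tax_credit"},
--     {"name": "Federal Bonding Program", "type": "bonding"},
--     {"name": "WIOA On-the-Job Training", "type": "ojt"},
--     {"name": "Vocational Rehabilitation", "type": "service"},
-- ]
--
-- def _check_federal_coverage(programs: List[Dict[str, Any]]) -> Dict[str, bool]:
--     """Check if universal federal programs are covered"""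
--     coverage = {p["name"]: False for p in UNIVERSAL_FEDERAL_PROGRAMS}
--
--     for program in programs:
--         program_name = program.get("program_name", "").lower()
--         description = program.get("description", "").lower()
--         text = f"{program_name} {description}"
--
--         # Check each federal program
--         federal_keywords = {
--             "Work Opportunity Tax Credit (WOTC)": ["wotc", "work opportunity"],
--             "Federal Bonding Program": ["federal bonding", "fidelity bonding"],
--             "WIOA On-the-Job Training": ["wioa", "on-the-job training", "ojt"],
--             "Vocational Rehabilitation": ["vocational rehabilitation", "vr services"]
--         }
--
--         for fed_prog, keywords in federal_keywords.items():
--             for keyword in keywords: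
--                 if keyword in text:
--                     coverage[fed_prog] = True
--                     break
--
--     return coverage
-- ===== SOURCE B (Python) =====
-- def _check_federal_coverage(programs):
--     """Check if universal federal programs are covered"""
--     federal_keywords = {
--         "Work Opportunity Tax Credit (WOTC)": ["wotc", "work opportunity"],
--         "Federal Bonding Program": ["federal bonding", "fidelity bonding"],
--         "WIOA On-the-Job Training": ["wioa", "on-the-job training", "ojt"],
--         "Vocational Rehabilitation": ["vocational rehabilitation", "vr services"]
--     }
--     # Aggregate all program texts into ONE corpus separated by '\n'.
--     # No keyword contains '\n', so a keyword occurs in the corpus iff it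
--     # occurs inside a single program's text: one substring scan per keyword
--     # replaces the per-program scans.
--     corpus = "\n".join(
--         f"{p.get('program_name', '').lower()} {p.get('description', '').lower()}"
--         for p in programs)
--     return {name: any(kw in corpus for kw in kws)
--             for name, kws in federal_keywords.items()}
-- ===== Notes on version B (the rewrite author's own statement) =====
-- stated objective: alternative
-- what changed: B aggregates all lowercased program texts into a single '\n'-separated corpus string and then does one substring test per keyword on that corpus (correct because no keyword contains '\n', so no match can cross a join boundary), instead of A's per-program loop mutating a coverage dict with per-program keyword scans and breaks.
import Mathlib
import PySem

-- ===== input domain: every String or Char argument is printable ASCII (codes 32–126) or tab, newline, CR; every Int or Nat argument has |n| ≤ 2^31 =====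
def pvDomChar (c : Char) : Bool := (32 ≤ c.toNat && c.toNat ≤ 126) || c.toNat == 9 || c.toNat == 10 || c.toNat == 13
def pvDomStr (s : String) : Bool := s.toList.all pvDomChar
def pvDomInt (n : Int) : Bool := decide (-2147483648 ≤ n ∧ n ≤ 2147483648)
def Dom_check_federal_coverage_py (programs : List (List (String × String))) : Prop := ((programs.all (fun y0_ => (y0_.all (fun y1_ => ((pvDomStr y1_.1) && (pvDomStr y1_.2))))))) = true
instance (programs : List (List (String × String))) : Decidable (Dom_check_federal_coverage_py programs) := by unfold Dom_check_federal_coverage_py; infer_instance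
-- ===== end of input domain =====

-- B replaces A's per-program accumulator loop by aggregating every lowercased text into one
-- '\n'-separated corpus and doing a single substring test per keyword (no keyword contains '\n',
-- so no match crosses a join boundary); objective: alternative algorithm, same asymptotic cost.

-- ===== PORT A =====
-- module constant UNIVERSAL_FEDERAL_PROGRAMS (list of literal dicts)
def pvUniversalFederalPrograms : List (PySem.Dict String String) :=
  [PySem.Dict.mk [("name", "Work Opportunity Tax Credit (WOTC)"), ("type", "tax_credit")],
   PySem.Dict.mk [("name", "Federal Bonding Program"), ("type", "bonding")],
   PySem.Dict.mk [("name", "WIOA On-the-Job Training"), ("type", "ojt")],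
   PySem.Dict.mk [("name", "Vocational Rehabilitation"), ("type", "service")]]

-- the federal_keywords dict literal (in A rebuilt inside the loop; in B a plain table)
def pvFederalKeywords : List (String × List String) :=
  [("Work Opportunity Tax Credit (WOTC)", ["wotc", "work opportunity"]),
   ("Federal Bonding Program", ["federal bonding", "fidelity bonding"]),
   ("WIOA On-the-Job Training", ["wioa", "on-the-job training", "ojt"]),
   ("Vocational Rehabilitation", ["vocational rehabilitation", "vr services"])]

-- inner `for keyword in keywords: if keyword in text: coverage[fed_prog] = True; break`
def pvKeywordLoop (cov : PySem.Dict String Bool) (fedProg : String) (kws : List String)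
    (text : String) : PySem.Dict String Bool :=
  match kws with
  | [] => cov
  | kw :: rest =>
      if PySem.Str.isIn kw text then cov.insert fedProg true
      else pvKeywordLoop cov fedProg rest text

-- middle `for fed_prog, keywords in federal_keywords.items():`
def pvFedLoop (cov : PySem.Dict String Bool) (text : String) : PySem.Dict String Bool :=
  pvFederalKeywords.foldl (fun cov fk => pvKeywordLoop cov fk.1 fk.2 text) cov

def check_federal_coverage_py (programs : List (List (String × String))) : List (String × Bool) :=
  -- coverage = {p["name"]: False for p in UNIVERSAL_FEDERAL_PROGRAMS}
  -- ("name" is present in every literal dict of the constant, so p["name"] is its get? defaulted)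
  let coverage : PySem.Dict String Bool :=
    pvUniversalFederalPrograms.foldl
      (fun d p => d.insert ((p.get? "name").getD "") false) PySem.Dict.empty
  let coverage := programs.foldl (fun cov program =>
      let program_name := PySem.Str.lower ((PySem.Dict.mk program).getD "program_name" "")
      let description := PySem.Str.lower ((PySem.Dict.mk program).getD "description" "")
      let text := program_name ++ " " ++ description
      pvFedLoop cov text) coverage
  coverage.items

-- ===== PORT B =====
def check_federal_coverage_py_alt (programs : List (List (String × String))) : List (String × Bool) :=
  -- corpus = "\n".join(f"{p.get('program_name','').lower()} {p.get('description','').lower()}" for p in programs)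
  let corpus := PySem.Str.join "\n" (programs.map (fun p =>
      PySem.Str.lower ((PySem.Dict.mk p).getD "program_name" "") ++ " " ++
      PySem.Str.lower ((PySem.Dict.mk p).getD "description" "")))
  -- {name: any(kw in corpus for kw in kws) for name, kws in federal_keywords.items()}
  (pvFederalKeywords.foldl (fun d nk =>
      d.insert nk.1 (nk.2.any (fun kw => PySem.Str.isIn kw corpus)))
    PySem.Dict.empty).items

-- ===== PRECONDITION & SPEC =====
def Spec_check_federal_coverage_py (programs : List (List (String × String))) (out : List (String × Bool)) : Prop := out = check_federal_coverage_py_alt programs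
instance (programs : List (List (String × String))) (out : List (String × Bool)) : Decidable (Spec_check_federal_coverage_py programs out) := by unfold Spec_check_federal_coverage_py; infer_instance

-- ===== CLAIM (what is proved, stated in full; the proofs are below) =====
def Claim_equal_check_federal_coverage_py : Prop := ∀ (programs : List (List (String × String))), Dom_check_federal_coverage_py programs → Spec_check_federal_coverage_py programs (check_federal_coverage_py programs)

-- ===== LEMMAS AND PROOFS =====

-- the 4-entry coverage dict in its fixed key order
def pvMk4 (b1 b2 b3 b4 : Bool) : PySem.Dict String Bool :=
  PySem.Dict.mk [("Work Opportunity Tax Credit (WOTC)", b1), ("Federal Bonding Program", b2),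
                 ("WIOA On-the-Job Training", b3), ("Vocational Rehabilitation", b4)]

-- the keyword loop with break sets the key iff some keyword matches
theorem pvKeywordLoop_eq (cov : PySem.Dict String Bool) (fedProg : String) (kws : List String)
    (text : String) :
    pvKeywordLoop cov fedProg kws text =
      if kws.any (fun kw => PySem.Str.isIn kw text) then cov.insert fedProg true else cov := by
  induction kws with
  | nil => simp [pvKeywordLoop]
  | cons kw rest ih =>
      cases h : PySem.Str.isIn kw text with
      | true => simp only [pvKeywordLoop, List.any_cons, h, Bool.true_or, if_true]
      | false => simp only [pvKeywordLoop, List.any_cons, h, Bool.false_or,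
                   Bool.false_eq_true, if_false, ih]

theorem pvInsert1 (b1 b2 b3 b4 : Bool) :
    (pvMk4 b1 b2 b3 b4).insert "Work Opportunity Tax Credit (WOTC)" true = pvMk4 true b2 b3 b4 := rfl
theorem pvInsert2 (b1 b2 b3 b4 : Bool) :
    (pvMk4 b1 b2 b3 b4).insert "Federal Bonding Program" true = pvMk4 b1 true b3 b4 := rfl
theorem pvInsert3 (b1 b2 b3 b4 : Bool) :
    (pvMk4 b1 b2 b3 b4).insert "WIOA On-the-Job Training" true = pvMk4 b1 b2 true b4 := rfl
theorem pvInsert4 (b1 b2 b3 b4 : Bool) :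
    (pvMk4 b1 b2 b3 b4).insert "Vocational Rehabilitation" true = pvMk4 b1 b2 b3 true := rfl

-- matching predicate of one federal entry on one text
def pvHit (kws : List String) (t : String) : Bool := kws.any (fun kw => PySem.Str.isIn kw t)

-- one program step ORs the per-text hits into the 4-entry state
theorem pvFedLoop_mk4 (b1 b2 b3 b4 : Bool) (t : String) :
    pvFedLoop (pvMk4 b1 b2 b3 b4) t =
      pvMk4 (b1 || pvHit ["wotc", "work opportunity"] t)
            (b2 || pvHit ["federal bonding", "fidelity bonding"] t)
            (b3 || pvHit ["wioa", "on-the-job training", "ojt"] t)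
            (b4 || pvHit ["vocational rehabilitation", "vr services"] t) := by
  simp only [pvFedLoop, pvFederalKeywords, List.foldl_cons, List.foldl_nil, pvKeywordLoop_eq, pvHit]
  generalize (["wotc", "work opportunity"].any fun kw => PySem.Str.isIn kw t) = d1
  generalize (["federal bonding", "fidelity bonding"].any fun kw => PySem.Str.isIn kw t) = d2
  generalize (["wioa", "on-the-job training", "ojt"].any fun kw => PySem.Str.isIn kw t) = d3
  generalize (["vocational rehabilitation", "vr services"].any fun kw => PySem.Str.isIn kw t) = d4
  cases d1 <;> cases d2 <;> cases d3 <;> cases d4 <;>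
    simp only [if_true, if_false, Bool.false_eq_true, Bool.or_true, Bool.or_false,
      pvInsert1, pvInsert2, pvInsert3, pvInsert4]

-- the whole program loop of A, for any text extractor f
theorem pvLoop_mk4 (f : List (String × String) → String)
    (programs : List (List (String × String))) :
    ∀ (b1 b2 b3 b4 : Bool),
    programs.foldl (fun cov program => pvFedLoop cov (f program)) (pvMk4 b1 b2 b3 b4) =
      pvMk4 (b1 || programs.any (fun p => pvHit ["wotc", "work opportunity"] (f p)))
            (b2 || programs.any (fun p => pvHit ["federal bonding", "fidelity bonding"] (f p)))
            (b3 || programs.any (fun p => pvHit ["wioa", "on-the-job training", "ojt"] (f p)))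
            (b4 || programs.any (fun p => pvHit ["vocational rehabilitation", "vr services"] (f p))) := by
  induction programs with
  | nil => simp
  | cons p rest ih =>
      intro b1 b2 b3 b4
      simp only [List.foldl_cons, pvFedLoop_mk4, ih, List.any_cons, Bool.or_assoc]

-- a prefix of t ++ c :: s avoiding c stays inside t
theorem pvPrefixSep (c : Char) (s : List Char) :
    ∀ (kw t : List Char), c ∉ kw → kw <+: t ++ c :: s → kw <+: t := by
  intro kw
  induction kw with
  | nil => intro t _ _; exact List.nil_prefix
  | cons k kw' ih =>
      intro t hc hp
      cases t with
      | nil =>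
          rcases List.cons_prefix_cons.mp hp with ⟨rfl, -⟩
          exact absurd List.mem_cons_self hc
      | cons a t' =>
          rcases List.cons_prefix_cons.mp hp with ⟨rfl, hp'⟩
          exact List.cons_prefix_cons.mpr
            ⟨rfl, ih t' (fun h => hc (List.mem_cons_of_mem _ h)) hp'⟩

-- an occurrence of kw in t ++ c :: s with c ∉ kw lies wholly in t or wholly in s
theorem pvInfixSep (c : Char) (kw : List Char) (hne : kw ≠ []) (hc : c ∉ kw) :
    ∀ (t s : List Char), (kw <:+: t ++ c :: s ↔ kw <:+: t ∨ kw <:+: s) := by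
  intro t
  induction t with
  | nil =>
      intro s
      rw [List.nil_append, List.infix_cons_iff]
      constructor
      · rintro (hp | h)
        · exact absurd (List.prefix_nil.mp (pvPrefixSep c s kw [] hc hp)) hne
        · exact Or.inr h
      · rintro (h | h)
        · exact absurd (List.infix_nil.mp h) hne
        · exact Or.inr h
  | cons a t' ih =>
      intro s
      rw [List.cons_append, List.infix_cons_iff, ih s, List.infix_cons_iff]
      constructor
      · rintro (hp | h | h)
        · exact Or.inl (Or.inl (by
            have := pvPrefixSep c s kw (a :: t') hc (by simpa using hp)
            simpa using this))
        · exact Or.inl (Or.inr h)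
        · exact Or.inr h
      · rintro ((hp | h) | h)
        · exact Or.inl (by
            have : kw <+: (a :: t') ++ c :: s := hp.trans (List.prefix_append _ _)
            simpa using this)
        · exact Or.inr (Or.inl h)
        · exact Or.inr (Or.inr h)

-- a newline-free keyword is in the '\n'-joined corpus iff it is in one of the texts
theorem pvIsInJoin (kw : List Char) (hne : kw ≠ []) (hc : '\n' ∉ kw) :
    ∀ (texts : List (List Char)),
      PySem.Chars.isIn kw (PySem.Chars.join ['\n'] texts) =
        texts.any (fun t => PySem.Chars.isIn kw t) := by
  intro texts
  induction texts with
  | nil =>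
      have h0 : ¬ kw <:+: ([] : List Char) := fun h => hne (List.infix_nil.mp h)
      have hj : PySem.Chars.join ['\n'] [] = ([] : List Char) := rfl
      rw [hj, List.any_nil]
      cases h2 : PySem.Chars.isIn kw [] with
      | true => exact absurd ((PySem.Chars.isIn_iff_infix kw []).mp h2) h0
      | false => rfl
  | cons t rest ih =>
      cases rest with
      | nil => simp [PySem.Chars.join, List.intercalate]
      | cons u rest' =>
          rw [PySem.Chars.join_cons_cons]
          have hs : t ++ ['\n'] ++ PySem.Chars.join ['\n'] (u :: rest') =
              t ++ '\n' :: PySem.Chars.join ['\n'] (u :: rest') := by simp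
          rw [hs, List.any_cons, ← ih]
          rw [Bool.eq_iff_iff]
          simp only [Bool.or_eq_true, PySem.Chars.isIn_iff_infix]
          exact pvInfixSep '\n' kw hne hc t _

-- any distributes over a pointwise Bool.or
theorem pvAnyOr {α : Type} (xs : List α) (f g : α → Bool) :
    (xs.any f || xs.any g) = xs.any (fun x => f x || g x) := by
  induction xs with
  | nil => simp
  | cons x r ih =>
      simp only [List.any_cons, ← ih]
      cases f x <;> cases g x <;> simp

-- one federal entry on the corpus = program-major any, for good keyword lists
theorem pvEntry (kws : List String)
    (h : ∀ kw ∈ kws, kw.toList ≠ [] ∧ '\n' ∉ kw.toList) (texts : List String) :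
    kws.any (fun kw => PySem.Str.isIn kw (PySem.Str.join "\n" texts)) =
      texts.any (fun t => pvHit kws t) := by
  induction kws with
  | nil => simp [pvHit]
  | cons kw rest ih =>
      have hkw := h kw List.mem_cons_self
      have h1 : PySem.Str.isIn kw (PySem.Str.join "\n" texts) =
          texts.any (fun t => PySem.Str.isIn kw t) := by
        have := pvIsInJoin kw.toList hkw.1 hkw.2 (texts.map String.toList)
        simp only [PySem.Str.isIn_eq, PySem.Str.toList_join] at *
        rw [show ("\n" : String).toList = ['\n'] from rfl] at *
        rw [this, List.any_map]
        rfl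
      simp only [List.any_cons, h1, ih (fun k hk => h k (List.mem_cons_of_mem _ hk)), pvHit]
      rw [pvAnyOr]

-- B's literal 4-entry dict-comprehension fold, for any value function g
theorem pvAltFold_eq (g : List String → Bool) :
    pvFederalKeywords.foldl (fun d nk => d.insert nk.1 (g nk.2)) PySem.Dict.empty =
      pvMk4 (g ["wotc", "work opportunity"]) (g ["federal bonding", "fidelity bonding"])
            (g ["wioa", "on-the-job training", "ojt"])
            (g ["vocational rehabilitation", "vr services"]) := rfl

-- ===== VERDICT (by name: the statement is the Claim_ definition above) =====
set_option maxHeartbeats 1000000 in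
theorem check_federal_coverage_py_spec : Claim_equal_check_federal_coverage_py := by
  intro programs _
  show check_federal_coverage_py programs = check_federal_coverage_py_alt programs
  have hinit : pvUniversalFederalPrograms.foldl
      (fun d p => d.insert ((p.get? "name").getD "") false) PySem.Dict.empty =
      pvMk4 false false false false := rfl
  simp only [check_federal_coverage_py, check_federal_coverage_py_alt, hinit, pvLoop_mk4,
    Bool.false_or]
  rw [pvAltFold_eq (fun kws => kws.any (fun kw => PySem.Str.isIn kw (PySem.Str.join "\n"
      (programs.map (fun p =>
        PySem.Str.lower ((PySem.Dict.mk p).getD "program_name" "") ++ " " ++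
        PySem.Str.lower ((PySem.Dict.mk p).getD "description" ""))))))]
  rw [pvEntry _ (by decide), pvEntry _ (by decide), pvEntry _ (by decide), pvEntry _ (by decide)]
  simp only [List.any_map, Function.comp_def]
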